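-- pv_equiv track=rewrite | github.com/sthilaid/convertData | convertdata.py | desShiftSubKey
-- ===== SOURCE A (Python) =====
-- def testBit(int_type, offset):
--     mask = 1 << offset
--     return 1 if (int_type & mask) != 0 else 0
--
-- def setBit(int_type, offset):
--     mask = 1 << offset
--     return (int_type | mask)
--
-- def clearBit(int_type, offset):
--     mask = ~(1 << offset)
--     return(int_type & mask)
--
-- def toggleBit(int_type, offset, val):
--     if val:
--         return setBit(int_type, offset)
--     else:
--         return clearBit(int_type, offset)
--
-- def chunkFn(chunk, offset, fn):
--     byteCount = len(chunk)
--     assert offset <= byteCount * 8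
--     byteIdx = byteCount - 1 - (offset // 8)
--     bitIdx  = offset % 8
--     return fn(chunk[byteIdx], bitIdx)
--
-- def modifyChunkFn(chunk, offset, fn):
--     byteCount = len(chunk)
--     assert offset <= byteCount * 8
--     byteIdx = byteCount - 1 - (offset // 8)
--     bitIdx  = offset % 8
--     chunk[byteIdx] = fn(chunk[byteIdx], bitIdx)
--
-- def desShiftSubKey(k, dir, startBit, endBit):
--     # print ("desShiftSubKey(%s, %d, %d, %d)" % (k, dir, startBit, endBit))
--     bitrange = endBit - startBit + 1
--     shiftedKey = k.copy()
--     if dir > 0: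
--         lastbit = chunkFn(k, endBit, testBit)
--         for i in range(bitrange-1):
--             bit = startBit + i
--             nextBit = bit + 1
--             bitValue = chunkFn(k, bit, testBit)
--             modifyChunkFn(shiftedKey, nextBit, lambda b,o: toggleBit(b, o, bitValue))
--         modifyChunkFn(shiftedKey, startBit, lambda b,o: toggleBit(b, o, lastbit))
--     else:
--         firstbit = chunkFn(k, startBit, testBit)
--         for i in range(bitrange-1):
--             bit = startBit + i
--             nextBit = bit + 1
--             bitValue = chunkFn(k, nextBit, testBit)
--             modifyChunkFn(shiftedKey, bit, lambda b,o: toggleBit(b, o, bitValue))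
--         modifyChunkFn(shiftedKey, endBit, lambda b,o: toggleBit(b, o, firstbit))
--     return shiftedKey
-- ===== SOURCE B (Python) =====
-- # Gather-rotate-scatter re-implementation: read the bit values of the range in one
-- # pass, rotate the list by one, write it back in a second pass.
-- def _bitAddr(chunk, offset):
--     return len(chunk) - 1 - (offset // 8), offset % 8
--
-- def _readBit(chunk, offset):
--     byteIdx, bitIdx = _bitAddr(chunk, offset)
--     return (chunk[byteIdx] >> bitIdx) & 1
--
-- def _writeBit(chunk, offset, val):
--     byteIdx, bitIdx = _bitAddr(chunk, offset)
--     if val: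
--         chunk[byteIdx] |= 1 << bitIdx
--     else:
--         chunk[byteIdx] &= ~(1 << bitIdx)
--
-- def desShiftSubKey(k, dir, startBit, endBit):
--     n = endBit - startBit + 1
--     bits = [_readBit(k, startBit + j) for j in range(n)]
--     rot = bits[-1:] + bits[:-1] if dir > 0 else bits[1:] + bits[:1]
--     out = k.copy()
--     for j in range(n):
--         _writeBit(out, startBit + j, rot[j])
--     return out
-- ===== Notes on version B (the rewrite author's own statement) =====
-- stated objective: alternative
-- what changed: Replaces the interleaved read-modify loop with a gather-rotate-scatter decomposition: one pass reads the bit values of the range, the list is rotated by one with slicing, and a second pass writes it back.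
-- intended difference: When startBit > endBit (an empty bit range) A still performs one leftover write, copying the endBit bit of k onto startBit (resp. startBit onto endBit for dir<=0), so when those two bits differ A returns k with one bit overwritten; B returns an unmodified copy of k, the intended no-op for an empty range. — e.g. on desShiftSubKey([2], 1, 3, 1): A returns [10], B returns [2]
-- outside the precondition, e.g. on desShiftSubKey([5], 1, 0, 8): A returns [11], B returns [10]; on desShiftSubKey([5], 1, 8, 8): A returns [5], B returns [5]
import Mathlib
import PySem

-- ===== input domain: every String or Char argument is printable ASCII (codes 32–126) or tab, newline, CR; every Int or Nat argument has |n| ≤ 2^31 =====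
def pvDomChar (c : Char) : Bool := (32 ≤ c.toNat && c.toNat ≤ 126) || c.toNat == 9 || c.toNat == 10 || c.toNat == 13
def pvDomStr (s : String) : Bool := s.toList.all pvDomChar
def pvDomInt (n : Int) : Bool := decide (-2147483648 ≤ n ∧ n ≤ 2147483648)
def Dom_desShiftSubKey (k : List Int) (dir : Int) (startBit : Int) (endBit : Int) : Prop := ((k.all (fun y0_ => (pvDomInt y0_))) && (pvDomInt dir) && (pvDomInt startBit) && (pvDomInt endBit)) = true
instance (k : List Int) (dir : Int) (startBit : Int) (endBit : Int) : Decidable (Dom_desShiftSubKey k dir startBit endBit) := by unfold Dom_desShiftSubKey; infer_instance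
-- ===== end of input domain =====

-- B replaces A's interleaved read-modify loop by gather-rotate-scatter (one read pass,
-- a list rotation by slicing, one write pass); same cost, different decomposition.
-- Python A mutates only its local copy; the claim is about the return value.

-- ===== PORT A =====
-- testBit(int_type, offset); the offsets it is applied to are `offset % 8` ∈ [0,8), so `.toNat` is exact
def pvTestBit (int_type offset : Int) : Int :=
  if PySem.Int.band int_type ((1 : Int) <<< offset.toNat) ≠ 0 then 1 else 0

def pvSetBit (int_type offset : Int) : Int :=
  PySem.Int.bor int_type ((1 : Int) <<< offset.toNat)

def pvClearBit (int_type offset : Int) : Int :=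
  PySem.Int.band int_type (Int.not ((1 : Int) <<< offset.toNat))

def pvToggleBit (int_type offset val : Int) : Int :=
  if val ≠ 0 then pvSetBit int_type offset else pvClearBit int_type offset

-- chunkFn: `none` = the assert fails or chunk[byteIdx] raises IndexError (excluded by Pre_)
def pvChunkFn (chunk : List Int) (offset : Int) (fn : Int → Int → Int) : Option Int :=
  let byteCount : Int := chunk.length
  if offset ≤ byteCount * 8 then
    match PySem.List.pyGet? chunk (byteCount - 1 - PySem.Int.floordiv offset 8) with
    | some b => some (fn b (PySem.Int.mod offset 8))
    | none => none
  else none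

def pvModifyChunkFn (chunk : List Int) (offset : Int) (fn : Int → Int → Int) : Option (List Int) :=
  let byteCount : Int := chunk.length
  if offset ≤ byteCount * 8 then
    match PySem.List.pyGet? chunk (byteCount - 1 - PySem.Int.floordiv offset 8) with
    | some b => PySem.List.pySet? chunk (byteCount - 1 - PySem.Int.floordiv offset 8)
                  (fn b (PySem.Int.mod offset 8))
    | none => none
  else none

def desShiftSubKey (k : List Int) (dir : Int) (startBit : Int) (endBit : Int) : List Int :=
  let bitrange := endBit - startBit + 1
  let res : Option (List Int) :=
    if dir > 0 then
      match pvChunkFn k endBit pvTestBit with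
      | none => none
      | some lastbit =>
        let loop := (PySem.List.pyRange 0 (bitrange - 1) 1).foldl
          (fun (st : Option (List Int)) i => st.bind fun shiftedKey =>
            match pvChunkFn k (startBit + i) pvTestBit with
            | some bitValue =>
                pvModifyChunkFn shiftedKey (startBit + i + 1) (fun b o => pvToggleBit b o bitValue)
            | none => none) (some k)
        loop.bind fun shiftedKey =>
          pvModifyChunkFn shiftedKey startBit (fun b o => pvToggleBit b o lastbit)
    else
      match pvChunkFn k startBit pvTestBit with
      | none => none
      | some firstbit =>
        let loop := (PySem.List.pyRange 0 (bitrange - 1) 1).foldl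
          (fun (st : Option (List Int)) i => st.bind fun shiftedKey =>
            match pvChunkFn k (startBit + i + 1) pvTestBit with
            | some bitValue =>
                pvModifyChunkFn shiftedKey (startBit + i) (fun b o => pvToggleBit b o bitValue)
            | none => none) (some k)
        loop.bind fun shiftedKey =>
          pvModifyChunkFn shiftedKey endBit (fun b o => pvToggleBit b o firstbit)
  res.getD []   -- `none` = the Python raised (outside Pre_)

-- ===== PORT B =====
def pvBitAddr (chunk : List Int) (offset : Int) : Int × Int :=
  ((chunk.length : Int) - 1 - PySem.Int.floordiv offset 8, PySem.Int.mod offset 8)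

-- IndexError in Python B = `none`/default below; unreachable under Pre_
def pvReadBit (chunk : List Int) (offset : Int) : Int :=
  match PySem.List.pyGet? chunk (pvBitAddr chunk offset).1 with
  | some b => PySem.Int.band (b >>> (pvBitAddr chunk offset).2.toNat) 1
  | none => 0

def pvWriteBit (chunk : List Int) (offset val : Int) : Option (List Int) :=
  match PySem.List.pyGet? chunk (pvBitAddr chunk offset).1 with
  | some b =>
      PySem.List.pySet? chunk (pvBitAddr chunk offset).1
        (if val ≠ 0 then PySem.Int.bor b ((1 : Int) <<< (pvBitAddr chunk offset).2.toNat)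
         else PySem.Int.band b (Int.not ((1 : Int) <<< (pvBitAddr chunk offset).2.toNat)))
  | none => none

def desShiftSubKey_alt (k : List Int) (dir : Int) (startBit : Int) (endBit : Int) : List Int :=
  let n := endBit - startBit + 1
  let bits := (PySem.List.pyRange 0 n 1).map (fun j => pvReadBit k (startBit + j))
  let rot :=
    if dir > 0 then
      PySem.List.slice bits (some (-1)) none ++ PySem.List.slice bits none (some (-1))
    else
      PySem.List.slice bits (some 1) none ++ PySem.List.slice bits none (some 1)
  let out := (PySem.List.pyRange 0 n 1).foldl
    (fun (st : Option (List Int)) j => st.bind fun o =>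
      pvWriteBit o (startBit + j) (PySem.List.pyGetD rot j 0)) (some k)
  out.getD []   -- `none` = the Python raised (outside Pre_)

-- ===== PRECONDITION & SPEC =====
-- Pre_ excludes (besides the offsets where A raises: a negative offset → IndexError, an offset
-- beyond 8*len(k) → AssertionError) the offsets EQUAL to 8*len(k): there A's `assert offset <= ...`
-- still passes and byteIdx = -1 wraps to the LAST byte by Python negative indexing, accidentally
-- aliasing bit 0 — A returns a value there; see the cites in claim.json.
def Pre_desShiftSubKey (k : List Int) (dir : Int) (startBit : Int) (endBit : Int) : Prop :=
  0 ≤ startBit ∧ startBit < 8 * k.length ∧ 0 ≤ endBit ∧ endBit < 8 * k.length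

instance (k : List Int) (dir : Int) (startBit : Int) (endBit : Int) :
    Decidable (Pre_desShiftSubKey k dir startBit endBit) := by
  unfold Pre_desShiftSubKey; infer_instance

def pvWitness_desShiftSubKey : List Int × Int × Int × Int := ([2], 1, 0, 3)

-- the bit of k addressed by a (valid, nonnegative) offset, read directly from the input
def pvProbeBit (k : List Int) (off : Int) : Int :=
  ((k.getD (k.length - 1 - off.toNat / 8) 0) >>> (off.toNat % 8)) % 2

-- When startBit > endBit (an empty bit range) A still performs one leftover write, copying the
-- endBit bit of k onto startBit (resp. startBit onto endBit for dir<=0), so when those two bits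
-- differ A returns k with one bit overwritten; B returns an unmodified copy of k, the intended
-- no-op for an empty range.
def D_desShiftSubKey (k : List Int) (dir : Int) (startBit : Int) (endBit : Int) : Prop :=
  endBit < startBit ∧ pvProbeBit k startBit ≠ pvProbeBit k endBit

instance (k : List Int) (dir : Int) (startBit : Int) (endBit : Int) :
    Decidable (D_desShiftSubKey k dir startBit endBit) := by
  unfold D_desShiftSubKey; infer_instance

def Spec_desShiftSubKey (k : List Int) (dir : Int) (startBit : Int) (endBit : Int) (out : List Int) : Prop :=
  ¬ D_desShiftSubKey k dir startBit endBit → out = desShiftSubKey_alt k dir startBit endBit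

instance (k : List Int) (dir : Int) (startBit : Int) (endBit : Int) (out : List Int) :
    Decidable (Spec_desShiftSubKey k dir startBit endBit out) := by
  unfold Spec_desShiftSubKey; infer_instance

def pvDiffWitness_desShiftSubKey : List Int × Int × Int × Int := ([2], 1, 3, 1)
def pvDiffWitnessOut_desShiftSubKey : (List Int) × (List Int) := ([10], [2])

-- ===== CLAIM (what is proved, stated in full; the proofs are below) =====
def Claim_unchanged_desShiftSubKey : Prop := ∀ (k : List Int) (dir : Int) (startBit : Int) (endBit : Int), Dom_desShiftSubKey k dir startBit endBit → Pre_desShiftSubKey k dir startBit endBit → Spec_desShiftSubKey k dir startBit endBit (desShiftSubKey k dir startBit endBit)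
def Claim_changed_desShiftSubKey : Prop := Dom_desShiftSubKey (pvDiffWitness_desShiftSubKey.1) (pvDiffWitness_desShiftSubKey.2.1) (pvDiffWitness_desShiftSubKey.2.2.1) (pvDiffWitness_desShiftSubKey.2.2.2) ∧ Pre_desShiftSubKey (pvDiffWitness_desShiftSubKey.1) (pvDiffWitness_desShiftSubKey.2.1) (pvDiffWitness_desShiftSubKey.2.2.1) (pvDiffWitness_desShiftSubKey.2.2.2) ∧ D_desShiftSubKey (pvDiffWitness_desShiftSubKey.1) (pvDiffWitness_desShiftSubKey.2.1) (pvDiffWitness_desShiftSubKey.2.2.1) (pvDiffWitness_desShiftSubKey.2.2.2) ∧ desShiftSubKey (pvDiffWitness_desShiftSubKey.1) (pvDiffWitness_desShiftSubKey.2.1) (pvDiffWitness_desShiftSubKey.2.2.1) (pvDiffWitness_desShiftSubKey.2.2.2) = pvDiffWitnessOut_desShiftSubKey.1 ∧ desShiftSubKey_alt (pvDiffWitness_desShiftSubKey.1) (pvDiffWitness_desShiftSubKey.2.1) (pvDiffWitness_desShiftSubKey.2.2.1) (pvDiffWitness_desShiftSubKey.2.2.2) = pvDiffWitnessOut_desShiftSubKey.2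 ∧ pvDiffWitnessOut_desShiftSubKey.1 ≠ pvDiffWitnessOut_desShiftSubKey.2
def Claim_exact_desShiftSubKey : Prop := ∀ (k : List Int) (dir : Int) (startBit : Int) (endBit : Int), Dom_desShiftSubKey k dir startBit endBit → Pre_desShiftSubKey k dir startBit endBit → D_desShiftSubKey k dir startBit endBit → desShiftSubKey k dir startBit endBit ≠ desShiftSubKey_alt k dir startBit endBit

-- ===== LEMMAS AND PROOFS =====

-- N1: Nat subtraction ↔ ldiff
theorem pv_sub_and (m n : Nat) : m - (m &&& n) = m.ldiff n := by
  induction m using Nat.strong_induction_on generalizing n with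
  | _ m ih =>
    rcases Nat.eq_zero_or_pos m with hm | hm
    · subst hm; simp [Nat.ldiff]
    have h2 : m / 2 < m := Nat.div_lt_self hm (by norm_num)
    have hand : m &&& n = 2 * (m / 2 &&& n / 2) + (m % 2 &&& n % 2) := by
      have hd : (m &&& n) / 2 = m / 2 &&& n / 2 := by
        simpa using Nat.and_div_two_pow (a := m) (b := n) (n := 1)
      have hm2 : (m &&& n) % 2 = m % 2 &&& n % 2 := by
        simpa using Nat.and_mod_two_pow (a := m) (b := n) (n := 1)
      omega
    have hld : m.ldiff n = 2 * ((m / 2).ldiff (n / 2)) + ((m % 2).ldiff (n % 2)) := by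
      have hd : (m.ldiff n) / 2 = (m / 2).ldiff (n / 2) := by
        simpa using Nat.bitwise_div_two_pow (f := fun a b => a && !b) (x := m) (y := n) (n := 1)
      have hm2 : (m.ldiff n) % 2 = (m % 2).ldiff (n % 2) := by
        have := Nat.bitwise_mod_two_pow (f := fun a b => a && !b) (x := m) (y := n) (n := 1)
        simpa using this
      omega
    have hih := ih (m / 2) h2 (n / 2)
    have hle : m / 2 &&& n / 2 ≤ m / 2 := Nat.and_le_left
    have hlow : (m % 2) - (m % 2 &&& n % 2) = (m % 2).ldiff (n % 2) := by
      have h1 : m % 2 < 2 := Nat.mod_lt _ (by norm_num)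
      have h2' : n % 2 < 2 := Nat.mod_lt _ (by norm_num)
      interval_cases h : (m % 2) <;> interval_cases h' : (n % 2) <;> simp [Nat.ldiff, Nat.bitwise]
    have hlle : m % 2 &&& n % 2 ≤ m % 2 := Nat.and_le_left
    omega

theorem pv_band_eq_land (a b : Int) : PySem.Int.band a b = Int.land a b := by
  cases a with
  | ofNat m =>
    cases b with
    | ofNat n => simp [PySem.Int.band, Int.land]
    | negSucc n =>
      have h0 : ¬ (0 : Int) ≤ Int.negSucc n := by omega
      have h2 : (0:Int) ≤ Int.ofNat m := Int.natCast_nonneg m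
      rw [PySem.Int.band, if_pos h2, if_neg h0]
      have hn : (-(Int.negSucc n) - 1).toNat = n := by simp [Int.negSucc_eq]
      rw [hn]
      show (((m - (m &&& n) : Nat)) : Int) = _
      rw [pv_sub_and]
      rfl
  | negSucc m =>
    cases b with
    | ofNat n =>
      have h0 : ¬ (0 : Int) ≤ Int.negSucc m := by omega
      have h2 : (0:Int) ≤ Int.ofNat n := Int.natCast_nonneg n
      rw [PySem.Int.band, if_neg h0, if_pos h2]
      have hm : (-(Int.negSucc m) - 1).toNat = m := by simp [Int.negSucc_eq]
      rw [hm]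
      show (((n - (n &&& m) : Nat)) : Int) = _
      rw [pv_sub_and]
      rfl
    | negSucc n =>
      have h0 : ¬ (0 : Int) ≤ Int.negSucc m := by omega
      have h1 : ¬ (0 : Int) ≤ Int.negSucc n := by omega
      rw [PySem.Int.band, if_neg h0, if_neg h1]
      have hm : (-(Int.negSucc m) - 1).toNat = m := by simp [Int.negSucc_eq]
      have hn : (-(Int.negSucc n) - 1).toNat = n := by simp [Int.negSucc_eq]
      rw [hm, hn]
      show -(((m ||| n : Nat)) : Int) - 1 = _
      simp [Int.land, Int.negSucc_eq]
      omega

theorem pv_bor_eq_lor (a b : Int) : PySem.Int.bor a b = Int.lor a b := by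
  cases a with
  | ofNat m =>
    cases b with
    | ofNat n => simp [PySem.Int.bor, Int.lor]
    | negSucc n =>
      have h0 : ¬ (0 : Int) ≤ Int.negSucc n := by omega
      have h2 : (0:Int) ≤ Int.ofNat m := Int.natCast_nonneg m
      rw [PySem.Int.bor, if_pos h2, if_neg h0]
      have hn : (-(Int.negSucc n) - 1).toNat = n := by simp [Int.negSucc_eq]
      rw [hn]
      show -(((n - (n &&& (Int.ofNat m).toNat) : Nat)) : Int) - 1 = _
      have hm : (Int.ofNat m).toNat = m := rfl
      rw [hm, pv_sub_and]
      simp [Int.lor, Int.negSucc_eq]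
      omega
  | negSucc m =>
    cases b with
    | ofNat n =>
      have h0 : ¬ (0 : Int) ≤ Int.negSucc m := by omega
      have h2 : (0:Int) ≤ Int.ofNat n := Int.natCast_nonneg n
      rw [PySem.Int.bor, if_neg h0, if_pos h2]
      have hm : (-(Int.negSucc m) - 1).toNat = m := by simp [Int.negSucc_eq]
      rw [hm]
      show -(((m - (m &&& (Int.ofNat n).toNat) : Nat)) : Int) - 1 = _
      have hn : (Int.ofNat n).toNat = n := rfl
      rw [hn, pv_sub_and]
      simp [Int.lor, Int.negSucc_eq]
      omega
    | negSucc n =>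
      have h0 : ¬ (0 : Int) ≤ Int.negSucc m := by omega
      have h1 : ¬ (0 : Int) ≤ Int.negSucc n := by omega
      rw [PySem.Int.bor, if_neg h0, if_neg h1]
      have hm : (-(Int.negSucc m) - 1).toNat = m := by simp [Int.negSucc_eq]
      have hn : (-(Int.negSucc n) - 1).toNat = n := by simp [Int.negSucc_eq]
      rw [hm, hn]
      show -(((m &&& n : Nat)) : Int) - 1 = _
      simp [Int.lor, Int.negSucc_eq]
      omega

theorem pv_not_eq_lnot (n : Int) : Int.not n = Int.lnot n := by
  cases n <;> rfl

theorem pv_int_ext {a b : Int} (h : ∀ i, a.testBit i = b.testBit i) : a = b := by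
  cases a with
  | ofNat m =>
    cases b with
    | ofNat n =>
      have := Nat.eq_of_testBit_eq (x := m) (y := n) (fun i => by simpa [Int.testBit] using h i)
      simp [this]
    | negSucc n =>
      exfalso
      have hi := h (max m n)
      have h1 : Nat.testBit m (max m n) = false :=
        Nat.testBit_lt_two_pow (Nat.lt_of_lt_of_le Nat.lt_two_pow_self
          (Nat.pow_le_pow_right (by norm_num) (le_max_left _ _)))
      have h2 : Nat.testBit n (max m n) = false :=
        Nat.testBit_lt_two_pow (Nat.lt_of_lt_of_le Nat.lt_two_pow_self
          (Nat.pow_le_pow_right (by norm_num) (le_max_right _ _)))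
      simp [Int.testBit, h1, h2] at hi
  | negSucc m =>
    cases b with
    | ofNat n =>
      exfalso
      have hi := h (max m n)
      have h1 : Nat.testBit m (max m n) = false :=
        Nat.testBit_lt_two_pow (Nat.lt_of_lt_of_le Nat.lt_two_pow_self
          (Nat.pow_le_pow_right (by norm_num) (le_max_left _ _)))
      have h2 : Nat.testBit n (max m n) = false :=
        Nat.testBit_lt_two_pow (Nat.lt_of_lt_of_le Nat.lt_two_pow_self
          (Nat.pow_le_pow_right (by norm_num) (le_max_right _ _)))
      simp [Int.testBit, h1, h2] at hi
    | negSucc n =>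
      have := Nat.eq_of_testBit_eq (x := m) (y := n) (fun i => by
        have := h i; simpa [Int.testBit] using this)
      simp [this]

theorem pv_one_shl (s : Nat) : ((1 : Int) <<< s) = ((2 ^ s : Nat) : Int) := by
  show Int.shiftLeft 1 s = _
  simp [Int.shiftLeft, Nat.shiftLeft_eq]

theorem pv_testBit_mask (s t : Nat) : ((1 : Int) <<< s).testBit t = decide (s = t) := by
  rw [pv_one_shl]
  simpa [Int.testBit] using Nat.testBit_two_pow (n := s) (m := t)

def pvTog (b : Int) (s : Nat) (v : Int) : Int :=
  if v ≠ 0 then PySem.Int.bor b ((1 : Int) <<< s)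
  else PySem.Int.band b (Int.not ((1 : Int) <<< s))

theorem pv_testBit_tog (b : Int) (s : Nat) (v : Int) (t : Nat) :
    (pvTog b s v).testBit t = if s = t then decide (v ≠ 0) else b.testBit t := by
  unfold pvTog
  by_cases hv : v ≠ 0 <;>
    simp only [hv, if_pos, if_neg, not_not, pv_bor_eq_lor, pv_band_eq_land, pv_not_eq_lnot,
      Int.testBit_lor, Int.testBit_land, Int.testBit_lnot, pv_testBit_mask] <;>
    by_cases h : s = t <;> simp [h, hv, pv_testBit_mask]

theorem pv_tog_comm (b : Int) (s t : Nat) (hst : s ≠ t) (v1 v2 : Int) :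
    pvTog (pvTog b s v1) t v2 = pvTog (pvTog b t v2) s v1 := by
  apply pv_int_ext
  intro i
  simp only [pv_testBit_tog]
  by_cases h1 : t = i <;> by_cases h2 : s = i <;> simp [h1, h2] <;> omega

def pvBitI (b : Int) (s : Nat) : Int := (b >>> s) % 2

theorem pv_testBit_eq (b : Int) (s : Nat) : b.testBit s = decide (pvBitI b s = 1) := by
  cases b with
  | ofNat u =>
    have h1 : (Int.ofNat u) >>> s = Int.ofNat (u >>> s) := rfl
    rw [Int.testBit, pvBitI, h1, Nat.testBit_eq_decide_div_mod_eq]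
    have : u >>> s = u / 2 ^ s := Nat.shiftRight_eq_div_pow u s
    rw [this]
    show _ = decide ((((u / 2 ^ s : Nat)) : Int) % 2 = 1)
    generalize u / 2 ^ s = a
    rcases Nat.mod_two_eq_zero_or_one a with h | h <;> simp [h] <;> omega
  | negSucc w =>
    have h1 : (Int.negSucc w) >>> s = Int.negSucc (w >>> s) := rfl
    rw [Int.testBit, pvBitI, h1, Nat.testBit_eq_decide_div_mod_eq]
    have hs : w >>> s = w / 2 ^ s := Nat.shiftRight_eq_div_pow w s
    have h2 : (Int.negSucc (w >>> s)) % 2 = 1 - ((w >>> s : Nat) : Int) % 2 := by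
      rw [Int.negSucc_eq]; omega
    rw [h2, hs]
    generalize w / 2 ^ s = a
    rcases Nat.mod_two_eq_zero_or_one a with h | h <;> simp [h] <;> omega

theorem pv_bitI_mem (b : Int) (s : Nat) : pvBitI b s = 0 ∨ pvBitI b s = 1 := by
  unfold pvBitI; generalize b >>> s = x; omega

theorem pv_bitI_eq (b : Int) (s : Nat) : pvBitI b s = if b.testBit s then 1 else 0 := by
  rw [pv_testBit_eq]
  rcases pv_bitI_mem b s with h | h <;> simp [h]

theorem pv_tog_self (b : Int) (s : Nat) : pvTog b s (pvBitI b s) = b := by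
  apply pv_int_ext
  intro i
  rw [pv_testBit_tog]
  by_cases h : s = i
  · subst h
    rw [pv_bitI_eq]
    by_cases hb : b.testBit s <;> simp [hb]
  · simp [h]

theorem pv_bitI_tog_self (b : Int) (s : Nat) (v : Int) :
    pvBitI (pvTog b s v) s = if v ≠ 0 then 1 else 0 := by
  rw [pv_bitI_eq, pv_testBit_tog]
  by_cases hv : v ≠ 0 <;> simp [hv]

theorem pv_tog_ne (b : Int) (s : Nat) (v : Int)
    (h : pvBitI b s ≠ (if v ≠ 0 then 1 else 0)) : pvTog b s v ≠ b := by
  intro he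
  apply h
  rw [← pv_bitI_tog_self b s v, he]

def pvBidx (L : Nat) (off : Int) : Nat := L - 1 - off.toNat / 8

def pvW (l : List Int) (off v : Int) : List Int :=
  l.set (pvBidx l.length off) (pvTog (l.getD (pvBidx l.length off) 0) (off.toNat % 8) v)

theorem pv_length_W (l : List Int) (off v : Int) : (pvW l off v).length = l.length := by
  simp [pvW]

theorem pv_bidx_lt (L : Nat) (off : Int) (h0 : 0 ≤ off) (h1 : off < 8 * L) :
    pvBidx L off < L := by
  unfold pvBidx
  omega

theorem pv_bidx_inj (L : Nat) (o1 o2 : Int) (h1 : 0 ≤ o1) (h2 : 0 ≤ o2) (hne : o1 ≠ o2)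
    (hb : pvBidx L o1 = pvBidx L o2) (hlt1 : o1 < 8 * L) (hlt2 : o2 < 8 * L) :
    o1.toNat % 8 ≠ o2.toNat % 8 := by
  unfold pvBidx at hb
  omega

theorem pv_getD_set_self (l : List Int) (i : Nat) (x : Int) (h : i < l.length) :
    (l.set i x).getD i 0 = x := by
  rw [List.getD_eq_getElem _ _ (by simpa using h)]
  simp [h]

theorem pv_getD_set_ne (l : List Int) (i j : Nat) (x : Int) (h : i ≠ j) :
    (l.set i x).getD j 0 = l.getD j 0 := by
  simp [List.getD_eq_getElem?_getD, List.getElem?_set_ne h]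

theorem pv_W_comm (l : List Int) (o1 o2 v1 v2 : Int) (h1 : 0 ≤ o1) (h2 : 0 ≤ o2)
    (hne : o1 ≠ o2) (hlt1 : o1 < 8 * l.length) (hlt2 : o2 < 8 * l.length) :
    pvW (pvW l o1 v1) o2 v2 = pvW (pvW l o2 v2) o1 v1 := by
  have hi1 : pvBidx l.length o1 < l.length := pv_bidx_lt _ _ h1 hlt1
  have hi2 : pvBidx l.length o2 < l.length := pv_bidx_lt _ _ h2 hlt2
  by_cases hb : pvBidx l.length o1 = pvBidx l.length o2
  · have hs := pv_bidx_inj l.length o1 o2 h1 h2 hne hb hlt1 hlt2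
    simp only [pvW, List.length_set, ← hb]
    rw [pv_getD_set_self _ _ _ hi1, pv_getD_set_self _ _ _ hi1, List.set_set, List.set_set]
    rw [pv_tog_comm _ _ _ hs]
  · simp only [pvW, List.length_set]
    rw [pv_getD_set_ne _ _ _ _ hb, pv_getD_set_ne _ _ _ _ (Ne.symm hb),
        List.set_comm _ _ hb]

def pvApplyW (l : List Int) (ws : List (Int × Int)) : List Int :=
  ws.foldl (fun a p => pvW a p.1 p.2) l

theorem pv_length_applyW (ws : List (Int × Int)) (l : List Int) :
    (pvApplyW l ws).length = l.length := by
  induction ws generalizing l with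
  | nil => rfl
  | cons p t ih => simp [pvApplyW, List.foldl_cons] at *; rw [ih, pv_length_W]

theorem pv_applyW_append (l : List Int) (ws1 ws2 : List (Int × Int)) :
    pvApplyW l (ws1 ++ ws2) = pvApplyW (pvApplyW l ws1) ws2 := by
  simp [pvApplyW, List.foldl_append]

theorem pv_applyW_pull (ws : List (Int × Int)) (l : List Int) (off v : Int)
    (h0 : 0 ≤ off) (h1 : off < 8 * l.length)
    (hws : ∀ p ∈ ws, 0 ≤ p.1 ∧ p.1 < 8 * l.length ∧ p.1 ≠ off) :
    pvApplyW (pvW l off v) ws = pvW (pvApplyW l ws) off v := by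
  induction ws generalizing l with
  | nil => rfl
  | cons p t ih =>
    have hp := hws p (by simp)
    have hcomm := pv_W_comm l off p.1 v p.2 h0 hp.1 (Ne.symm hp.2.2) h1 hp.2.1
    simp only [pvApplyW, List.foldl_cons] at *
    rw [hcomm, ih (pvW l p.1 p.2) (by rw [pv_length_W]; exact h1)
        (fun q hq => by rw [pv_length_W]; exact hws q (by simp [hq]))]

theorem pv_fd8 (off : Int) (h : 0 ≤ off) :
    PySem.Int.floordiv off 8 = ((off.toNat / 8 : Nat) : Int) := by
  rw [PySem.Int.floordiv_eq_ediv_of_pos (by norm_num)]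
  omega

theorem pv_md8 (off : Int) (h : 0 ≤ off) :
    PySem.Int.mod off 8 = ((off.toNat % 8 : Nat) : Int) := by
  rw [PySem.Int.mod_eq_emod_of_pos (by norm_num)]
  omega

theorem pv_band_mask (b : Int) (s : Nat) :
    PySem.Int.band b ((1 : Int) <<< s) = if b.testBit s then ((2 ^ s : Nat) : Int) else 0 := by
  apply pv_int_ext
  intro t
  rw [pv_band_eq_land, Int.testBit_land, pv_testBit_mask]
  have hpow : ((2 ^ s : Nat) : Int).testBit t = Nat.testBit (2 ^ s) t := rfl
  have hz : (0 : Int).testBit t = Nat.testBit 0 t := rfl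
  by_cases hbt : b.testBit s <;> by_cases hts : s = t
  · subst hts; simp only [hbt, if_pos, hpow, Bool.true_and]
    rw [Nat.testBit_two_pow_self]
    simp
  · simp only [hbt, if_pos, hpow, Bool.true_and]
    rw [Nat.testBit_two_pow_of_ne hts]
    simp [hts]
  · subst hts; simp [hbt, hz]
  · simp [hts, hbt, hz]

theorem pv_testBit_int (b o : Int) : pvTestBit b o = pvBitI b o.toNat := by
  unfold pvTestBit
  rw [pv_band_mask, pv_bitI_eq]
  by_cases h : b.testBit o.toNat <;>
    simp only [h, if_pos, if_neg, Bool.false_eq_true, not_false_eq_true]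
  · have : (0:Int) < ((2 ^ o.toNat : Nat) : Int) := by positivity
    rw [if_pos (by omega)]
  · simp


theorem pv_idx_cast (L : Nat) (off : Int) (h0 : 0 ≤ off) (h1 : off < 8 * L) :
    (L : Int) - 1 - ((off.toNat / 8 : Nat) : Int) = ((pvBidx L off : Nat) : Int) := by
  unfold pvBidx
  omega

theorem pv_pyGet_red (l : List Int) (off : Int) (h0 : 0 ≤ off) (h1 : off < 8 * l.length) :
    PySem.List.pyGet? l ((l.length : Int) - 1 - PySem.Int.floordiv off 8)
      = some (l.getD (pvBidx l.length off) 0) := by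
  rw [pv_fd8 off h0, pv_idx_cast l.length off h0 h1, PySem.List.pyGet?_natCast]
  rw [List.getElem?_eq_getElem (pv_bidx_lt l.length off h0 h1),
      List.getD_eq_getElem _ _ (pv_bidx_lt l.length off h0 h1)]

theorem pv_toggle_tog (b : Int) (s : Nat) (v : Int) :
    pvToggleBit b ((s : Nat) : Int) v = pvTog b s v := by
  simp [pvToggleBit, pvSetBit, pvClearBit, pvTog]

theorem pv_chunk_red (l : List Int) (off : Int) (h0 : 0 ≤ off) (h1 : off < 8 * l.length) :
    pvChunkFn l off pvTestBit
      = some (pvBitI (l.getD (pvBidx l.length off) 0) (off.toNat % 8)) := by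
  simp only [pvChunkFn]
  rw [if_pos (by omega : off ≤ (l.length : Int) * 8), pv_pyGet_red l off h0 h1,
      pv_md8 off h0]
  show some (pvTestBit (l.getD (pvBidx l.length off) 0) (((off.toNat % 8 : Nat)) : Int)) = _
  rw [pv_testBit_int, Int.toNat_natCast]

theorem pv_modify_red (l : List Int) (off v : Int) (h0 : 0 ≤ off) (h1 : off < 8 * l.length) :
    pvModifyChunkFn l off (fun b o => pvToggleBit b o v) = some (pvW l off v) := by
  simp only [pvModifyChunkFn]
  rw [if_pos (by omega : off ≤ (l.length : Int) * 8), pv_pyGet_red l off h0 h1]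
  show PySem.List.pySet? l ((l.length : Int) - 1 - PySem.Int.floordiv off 8) _ = _
  rw [pv_fd8 off h0, pv_idx_cast l.length off h0 h1,
      PySem.List.pySet?_natCast _ _ _ (pv_bidx_lt l.length off h0 h1),
      pv_md8 off h0, pv_toggle_tog]
  rfl

theorem pv_read_red (l : List Int) (off : Int) (h0 : 0 ≤ off) (h1 : off < 8 * l.length) :
    pvReadBit l off = pvBitI (l.getD (pvBidx l.length off) 0) (off.toNat % 8) := by
  simp only [pvReadBit, pvBitAddr]
  rw [pv_pyGet_red l off h0 h1, pv_md8 off h0]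
  show PySem.Int.band ((l.getD (pvBidx l.length off) 0) >>> (((off.toNat % 8 : Nat) : Int)).toNat) 1 = _
  rw [PySem.Int.band_one, PySem.Int.mod_eq_emod_of_pos (by norm_num), Int.toNat_natCast]
  rfl

theorem pv_write_red (l : List Int) (off v : Int) (h0 : 0 ≤ off) (h1 : off < 8 * l.length) :
    pvWriteBit l off v = some (pvW l off v) := by
  simp only [pvWriteBit, pvBitAddr]
  rw [pv_pyGet_red l off h0 h1]
  show PySem.List.pySet? l ((l.length : Int) - 1 - PySem.Int.floordiv off 8) _ = _
  rw [pv_fd8 off h0, pv_idx_cast l.length off h0 h1,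
      PySem.List.pySet?_natCast _ _ _ (pv_bidx_lt l.length off h0 h1),
      pv_md8 off h0, Int.toNat_natCast]
  rfl


theorem pv_probe_eq (k : List Int) (off : Int) :
    pvProbeBit k off = pvBitI (k.getD (pvBidx k.length off) 0) (off.toNat % 8) := rfl

def pvWsPos (k : List Int) (s : Int) (m : Nat) : List (Int × Int) :=
  (List.range m).map (fun (i : Nat) => (s + ((i : Nat) : Int) + 1, pvProbeBit k (s + ((i : Nat) : Int))))

def pvWsNeg (k : List Int) (s : Int) (m : Nat) : List (Int × Int) :=
  (List.range m).map (fun (i : Nat) => (s + ((i : Nat) : Int), pvProbeBit k (s + ((i : Nat) : Int) + 1)))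

theorem pv_pyRange_succ (m : Nat) :
    PySem.List.pyRange 0 ((m + 1 : Nat) : Int) 1
      = PySem.List.pyRange 0 (m : Int) 1 ++ [((m : Nat) : Int)] := by
  rw [PySem.List.pyRange_one, PySem.List.pyRange_one]
  simp [List.range_succ]

theorem pv_loopA_pos (k : List Int) (s : Int) (hs : 0 ≤ s) (m : Nat)
    (hm : s + m < 8 * k.length) (acc : List Int) (hlen : acc.length = k.length) :
    ((PySem.List.pyRange 0 (m : Int) 1).foldl
      (fun (st : Option (List Int)) i => st.bind fun sk =>
        match pvChunkFn k (s + i) pvTestBit with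
        | some bv => pvModifyChunkFn sk (s + i + 1) (fun b o => pvToggleBit b o bv)
        | none => none) (some acc))
      = some (pvApplyW acc (pvWsPos k s m)) := by
  induction m with
  | zero => rfl
  | succ m ih =>
    rw [pv_pyRange_succ, List.foldl_append,
        ih (by push_cast at hm ⊢; omega)]
    have hv0 : (0:Int) ≤ s + (m : Nat) := by positivity
    have hv1 : s + (m : Nat) < 8 * k.length := by push_cast at hm ⊢; omega
    have hlen2 : (pvApplyW acc (pvWsPos k s m)).length = k.length := by
      rw [pv_length_applyW]; exact hlen
    simp only [List.foldl_cons, List.foldl_nil, Option.bind_some]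
    rw [pv_chunk_red k (s + (m:Nat)) hv0 hv1, ← pv_probe_eq]
    show pvModifyChunkFn (pvApplyW acc (pvWsPos k s m)) (s + ((m : Nat) : Int) + 1)
      (fun b o => pvToggleBit b o (pvProbeBit k (s + ((m : Nat) : Int)))) = _
    rw [pv_modify_red _ _ _ (by positivity)
      (by rw [hlen2]; push_cast at hm ⊢; omega)]
    have hws : pvWsPos k s (m + 1)
        = pvWsPos k s m ++ [(s + ((m : Nat) : Int) + 1, pvProbeBit k (s + ((m : Nat) : Int)))] := by
      simp [pvWsPos, List.range_succ]
    rw [hws, pv_applyW_append]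
    rfl

theorem pv_loopA_neg (k : List Int) (s : Int) (hs : 0 ≤ s) (m : Nat)
    (hm : s + m < 8 * k.length) (acc : List Int) (hlen : acc.length = k.length) :
    ((PySem.List.pyRange 0 (m : Int) 1).foldl
      (fun (st : Option (List Int)) i => st.bind fun sk =>
        match pvChunkFn k (s + i + 1) pvTestBit with
        | some bv => pvModifyChunkFn sk (s + i) (fun b o => pvToggleBit b o bv)
        | none => none) (some acc))
      = some (pvApplyW acc (pvWsNeg k s m)) := by
  induction m with
  | zero => rfl
  | succ m ih =>
    rw [pv_pyRange_succ, List.foldl_append,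
        ih (by push_cast at hm ⊢; omega)]
    have hv0 : (0:Int) ≤ s + ((m : Nat) : Int) + 1 := by positivity
    have hv1 : s + ((m : Nat) : Int) + 1 < 8 * k.length := by push_cast at hm ⊢; omega
    have hlen2 : (pvApplyW acc (pvWsNeg k s m)).length = k.length := by
      rw [pv_length_applyW]; exact hlen
    simp only [List.foldl_cons, List.foldl_nil, Option.bind_some]
    rw [pv_chunk_red k (s + ((m : Nat) : Int) + 1) hv0 hv1, ← pv_probe_eq]
    show pvModifyChunkFn (pvApplyW acc (pvWsNeg k s m)) (s + ((m : Nat) : Int))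
      (fun b o => pvToggleBit b o (pvProbeBit k (s + ((m : Nat) : Int) + 1))) = _
    rw [pv_modify_red _ _ _ (by positivity)
      (by rw [hlen2]; push_cast at hm ⊢; omega)]
    have hws : pvWsNeg k s (m + 1)
        = pvWsNeg k s m ++ [(s + ((m : Nat) : Int), pvProbeBit k (s + ((m : Nat) : Int) + 1))] := by
      simp [pvWsNeg, List.range_succ]
    rw [hws, pv_applyW_append]
    rfl

theorem pv_loopB (k : List Int) (s : Int) (hs : 0 ≤ s) (m : Nat) (rot : List Int)
    (hm : s + m ≤ 8 * k.length) (acc : List Int) (hlen : acc.length = k.length) :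
    ((PySem.List.pyRange 0 (m : Int) 1).foldl
      (fun (st : Option (List Int)) j => st.bind fun o =>
        pvWriteBit o (s + j) (PySem.List.pyGetD rot j 0)) (some acc))
      = some (pvApplyW acc ((List.range m).map
          (fun j => (s + ((j : Nat) : Int), PySem.List.pyGetD rot ((j : Nat) : Int) 0)))) := by
  induction m with
  | zero => rfl
  | succ m ih =>
    rw [pv_pyRange_succ, List.foldl_append,
        ih (by push_cast at hm ⊢; omega)]
    have hlen2 : (pvApplyW acc ((List.range m).map
        (fun j => (s + ((j : Nat) : Int), PySem.List.pyGetD rot ((j : Nat) : Int) 0)))).length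
        = k.length := by
      rw [pv_length_applyW]; exact hlen
    simp only [List.foldl_cons, List.foldl_nil, Option.bind_some]
    rw [pv_write_red _ _ _ (by positivity)
      (by rw [hlen2]; push_cast at hm ⊢; omega)]
    rw [List.range_succ, List.map_append, pv_applyW_append]
    rfl


theorem pv_pyRange_toNat (b : Int) :
    PySem.List.pyRange 0 b 1 = PySem.List.pyRange 0 ((b.toNat : Nat) : Int) 1 := by
  rw [PySem.List.pyRange_one, PySem.List.pyRange_one]
  congr 2
  omega

theorem pv_A_pos (k : List Int) (dir s e : Int) (hd : dir > 0)
    (h0 : 0 ≤ s) (h1 : s < 8 * k.length) (h2 : 0 ≤ e) (h3 : e < 8 * k.length) :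
    desShiftSubKey k dir s e
      = pvW (pvApplyW k (pvWsPos k s (e - s).toNat)) s (pvProbeBit k e) := by
  unfold desShiftSubKey
  simp only [if_pos hd]
  rw [pv_chunk_red k e h2 h3, ← pv_probe_eq]
  show ((((PySem.List.pyRange 0 (e - s + 1 - 1) 1).foldl _ (some k)).bind
    fun shiftedKey => pvModifyChunkFn shiftedKey s
      (fun b o => pvToggleBit b o (pvProbeBit k e))) : Option (List Int)).getD [] = _
  have he : e - s + 1 - 1 = e - s := by ring
  rw [he, pv_pyRange_toNat (e - s),
      pv_loopA_pos k s h0 (e - s).toNat (by omega) k rfl, Option.bind_some,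
      pv_modify_red _ _ _ h0 (by rw [pv_length_applyW]; exact h1)]
  rfl

theorem pv_A_neg (k : List Int) (dir s e : Int) (hd : ¬ dir > 0)
    (h0 : 0 ≤ s) (h1 : s < 8 * k.length) (h2 : 0 ≤ e) (h3 : e < 8 * k.length) :
    desShiftSubKey k dir s e
      = pvW (pvApplyW k (pvWsNeg k s (e - s).toNat)) e (pvProbeBit k s) := by
  unfold desShiftSubKey
  simp only [if_neg hd]
  rw [pv_chunk_red k s h0 h1, ← pv_probe_eq]
  show ((((PySem.List.pyRange 0 (e - s + 1 - 1) 1).foldl _ (some k)).bind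
    fun shiftedKey => pvModifyChunkFn shiftedKey e
      (fun b o => pvToggleBit b o (pvProbeBit k s))) : Option (List Int)).getD [] = _
  have he : e - s + 1 - 1 = e - s := by ring
  rw [he, pv_pyRange_toNat (e - s),
      pv_loopA_neg k s h0 (e - s).toNat (by omega) k rfl, Option.bind_some,
      pv_modify_red _ _ _ h2 (by rw [pv_length_applyW]; exact h3)]
  rfl

theorem pv_B_empty (k : List Int) (dir s e : Int) (he : e < s) :
    desShiftSubKey_alt k dir s e = k := by
  have hr : PySem.List.pyRange 0 (e - s + 1) 1 = [] := by
    rw [PySem.List.pyRange_one]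
    have : (e - s + 1 - 0).toNat = 0 := by omega
    rw [this]
    rfl
  unfold desShiftSubKey_alt
  simp only [hr, List.map_nil, List.foldl_nil, Option.getD_some]


theorem pv_B_pos (k : List Int) (dir s e : Int) (hd : dir > 0) (hse : s ≤ e)
    (h0 : 0 ≤ s) (h3 : e < 8 * k.length) :
    desShiftSubKey_alt k dir s e
      = pvW (pvApplyW k (pvWsPos k s (e - s).toNat)) s (pvProbeBit k e) := by
  have hm : ((e - s).toNat : Int) = e - s := by omega
  set m := (e - s).toNat with hmdef
  have hsm : s + ((m : Nat) : Int) = e := by omega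
  have hn : e - s + 1 = (((m + 1 : Nat) : Nat) : Int) := by push_cast; omega
  set g : Nat → Int := fun j => pvProbeBit k (s + ((j : Nat) : Int)) with hg
  have hbits : (PySem.List.pyRange 0 (e - s + 1) 1).map (fun j => pvReadBit k (s + j))
      = (List.range (m + 1)).map g := by
    rw [hn, PySem.List.pyRange_one]
    have hc : ((((m + 1 : Nat) : Nat) : Int) - 0).toNat = m + 1 := by omega
    rw [hc, List.map_map]
    apply List.map_congr_left
    intro j hj
    have hj' : j < m + 1 := List.mem_range.mp hj
    show pvReadBit k (s + (0 + (j : Int))) = g j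
    rw [zero_add, pv_read_red k (s + (j : Int)) (by positivity) (by omega), ← pv_probe_eq]
  unfold desShiftSubKey_alt
  simp only [if_pos hd]
  rw [hbits]
  have hsplit : (List.range (m + 1)).map g = (List.range m).map g ++ [g m] := by
    rw [List.range_succ, List.map_append, List.map_cons, List.map_nil]
  have hsl1 : PySem.List.slice ((List.range (m + 1)).map g) (some (-1)) none = [g m] := by
    rw [PySem.List.slice_from_neg_one, hsplit]
    have hlen : ((List.range m).map g).length = m := by simp
    have hlen2 : (((List.range m).map g) ++ [g m]).length = m + 1 := by simp
    rw [hlen2]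
    have : m + 1 - 1 = ((List.range m).map g).length := by omega
    rw [this, List.drop_left]
  have hsl2 : PySem.List.slice ((List.range (m + 1)).map g) none (some (-1))
      = (List.range m).map g := by
    rw [PySem.List.slice_to_neg_one, hsplit, List.dropLast_concat]
  rw [hsl1, hsl2, List.singleton_append, hn,
      pv_loopB k s h0 (m + 1) _ (by omega) k rfl]
  have hwl : (List.range (m + 1)).map
        (fun j => (s + ((j : Nat) : Int),
          PySem.List.pyGetD (g m :: (List.range m).map g) ((j : Nat) : Int) 0))
      = (s, g m) :: pvWsPos k s m := by
    rw [List.range_succ_eq_map, List.map_cons, List.map_map]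
    congr 1
    · simp
    · rw [pvWsPos]
      apply List.map_congr_left
      intro i hi
      have hi' : i < m := List.mem_range.mp hi
      show (s + ((Nat.succ i : Nat) : Int),
        PySem.List.pyGetD (g m :: (List.range m).map g) ((Nat.succ i : Nat) : Int) 0)
        = (s + ((i : Nat) : Int) + 1, pvProbeBit k (s + ((i : Nat) : Int)))
      rw [PySem.List.pyGetD_natCast]
      have hgd : (g m :: (List.range m).map g).getD (Nat.succ i) 0 = g i := by
        rw [List.getD_cons_succ, List.getD_eq_getElem _ _ (by simp [hi'])]
        simp
      rw [hgd]
      simp only [Prod.mk.injEq]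
      exact ⟨by push_cast; ring, rfl⟩
  rw [hwl]
  have hstep : pvApplyW k ((s, g m) :: pvWsPos k s m)
      = pvApplyW (pvW k s (g m)) (pvWsPos k s m) := rfl
  rw [hstep, pv_applyW_pull _ _ _ _ h0 (by omega) ?hws]
  case hws =>
    intro p hp
    obtain ⟨i, hi, rfl⟩ := List.mem_map.mp hp
    have hi' : i < m := List.mem_range.mp hi
    exact ⟨by positivity, by omega, by omega⟩
  have hge : g m = pvProbeBit k e := by rw [hg]; simp only [hsm]
  rw [hge]
  rfl


theorem pv_B_neg (k : List Int) (dir s e : Int) (hd : ¬ dir > 0) (hse : s ≤ e)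
    (h0 : 0 ≤ s) (h3 : e < 8 * k.length) :
    desShiftSubKey_alt k dir s e
      = pvW (pvApplyW k (pvWsNeg k s (e - s).toNat)) e (pvProbeBit k s) := by
  have hm : ((e - s).toNat : Int) = e - s := by omega
  set m := (e - s).toNat with hmdef
  have hsm : s + ((m : Nat) : Int) = e := by omega
  have hn : e - s + 1 = (((m + 1 : Nat) : Nat) : Int) := by push_cast; omega
  set g : Nat → Int := fun j => pvProbeBit k (s + ((j : Nat) : Int)) with hg
  have hbits : (PySem.List.pyRange 0 (e - s + 1) 1).map (fun j => pvReadBit k (s + j))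
      = (List.range (m + 1)).map g := by
    rw [hn, PySem.List.pyRange_one]
    have hc : ((((m + 1 : Nat) : Nat) : Int) - 0).toNat = m + 1 := by omega
    rw [hc, List.map_map]
    apply List.map_congr_left
    intro j hj
    have hj' : j < m + 1 := List.mem_range.mp hj
    show pvReadBit k (s + (0 + (j : Int))) = g j
    rw [zero_add, pv_read_red k (s + (j : Int)) (by positivity) (by omega), ← pv_probe_eq]
  unfold desShiftSubKey_alt
  simp only [if_neg hd]
  rw [hbits]
  have hsplit : (List.range (m + 1)).map g
      = g 0 :: (List.range m).map (fun i => g (i + 1)) := by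
    rw [List.range_succ_eq_map, List.map_cons, List.map_map]
    rfl
  have hsl1 : PySem.List.slice ((List.range (m + 1)).map g) (some 1) none
      = (List.range m).map (fun i => g (i + 1)) := by
    rw [PySem.List.slice_from_one, hsplit]
    rfl
  have hsl2 : PySem.List.slice ((List.range (m + 1)).map g) none (some 1) = [g 0] := by
    have h1 : ((1 : Nat) : Int) = (1 : Int) := by norm_num
    rw [← h1, PySem.List.slice_to_natCast, hsplit]
    rfl
  rw [hsl1, hsl2, hn, pv_loopB k s h0 (m + 1) _ (by omega) k rfl]
  have hwl : (List.range (m + 1)).map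
        (fun j => (s + ((j : Nat) : Int),
          PySem.List.pyGetD ((List.range m).map (fun i => g (i + 1)) ++ [g 0]) ((j : Nat) : Int) 0))
      = pvWsNeg k s m ++ [(e, pvProbeBit k s)] := by
    rw [List.range_succ, List.map_append, List.map_cons, List.map_nil]
    congr 1
    · rw [pvWsNeg]
      apply List.map_congr_left
      intro i hi
      have hi' : i < m := List.mem_range.mp hi
      rw [PySem.List.pyGetD_natCast]
      have hgd : (((List.range m).map (fun i => g (i + 1)) ++ [g 0])).getD i 0 = g (i + 1) := by
        rw [List.getD_append _ _ _ _ (by simp [hi']),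
            List.getD_eq_getElem _ _ (by simp [hi'])]
        simp
      rw [hgd]
      simp only [Prod.mk.injEq, true_and]
      show pvProbeBit k (s + (((i + 1 : Nat) : Nat) : Int)) = pvProbeBit k (s + ((i : Nat) : Int) + 1)
      congr 1
      push_cast
      ring
    · have hgd : (((List.range m).map (fun i => g (i + 1)) ++ [g 0])).getD m 0 = g 0 := by
        rw [List.getD_append_right _ _ _ _ (by simp)]
        simp
      rw [PySem.List.pyGetD_natCast, hgd]
      simp only [List.cons.injEq, Prod.mk.injEq, and_true]
      refine ⟨hsm, ?_⟩
      show g 0 = pvProbeBit k s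
      rw [hg]
      simp
  rw [hwl, pv_applyW_append]
  rfl


theorem pv_probe_mem (k : List Int) (off : Int) :
    pvProbeBit k off = 0 ∨ pvProbeBit k off = 1 := by
  rw [pv_probe_eq]
  exact pv_bitI_mem _ _

theorem pv_W_self (k : List Int) (off : Int) (h0 : 0 ≤ off) (h1 : off < 8 * k.length) :
    pvW k off (pvProbeBit k off) = k := by
  have hi := pv_bidx_lt k.length off h0 h1
  unfold pvW
  rw [pv_probe_eq, pv_tog_self, List.getD_eq_getElem _ _ hi, List.set_getElem_self hi]

theorem pv_W_ne (k : List Int) (off v : Int) (h0 : 0 ≤ off) (h1 : off < 8 * k.length)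
    (hv : v = 0 ∨ v = 1) (hne : pvProbeBit k off ≠ v) : pvW k off v ≠ k := by
  have hi := pv_bidx_lt k.length off h0 h1
  intro hEq
  have h2 : pvTog (k.getD (pvBidx k.length off) 0) (off.toNat % 8) v
      = k.getD (pvBidx k.length off) 0 := by
    have hc : (pvW k off v).getD (pvBidx k.length off) 0 = k.getD (pvBidx k.length off) 0 := by
      rw [hEq]
    unfold pvW at hc
    rw [pv_getD_set_self _ _ _ hi] at hc
    exact hc
  refine pv_tog_ne _ _ _ ?_ h2
  rw [← pv_probe_eq]
  rcases hv with rfl | rfl <;> simpa using hne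

-- ===== VERDICT (by name: the statement is the Claim_ definition above) =====
theorem desShiftSubKey_spec : Claim_unchanged_desShiftSubKey := by
  unfold Claim_unchanged_desShiftSubKey Spec_desShiftSubKey
  intro k dir s e hdom hpre hnd
  obtain ⟨h0, h1, h2, h3⟩ := hpre
  by_cases hse : s ≤ e
  · by_cases hd : dir > 0
    · rw [pv_A_pos k dir s e hd h0 h1 h2 h3, pv_B_pos k dir s e hd hse h0 h3]
    · rw [pv_A_neg k dir s e hd h0 h1 h2 h3, pv_B_neg k dir s e hd hse h0 h3]
  · have hes : e < s := by omega
    rw [pv_B_empty k dir s e hes]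
    have hpeq : pvProbeBit k s = pvProbeBit k e := by
      by_contra hne
      exact hnd ⟨hes, hne⟩
    have hz : (e - s).toNat = 0 := by omega
    by_cases hd : dir > 0
    · rw [pv_A_pos k dir s e hd h0 h1 h2 h3, hz, ← hpeq]
      exact pv_W_self k s h0 h1
    · rw [pv_A_neg k dir s e hd h0 h1 h2 h3, hz, hpeq]
      exact pv_W_self k e h2 h3
theorem desShiftSubKey_changed : Claim_changed_desShiftSubKey := by
  unfold Claim_changed_desShiftSubKey; decide
theorem desShiftSubKey_tight : Claim_exact_desShiftSubKey := by
  unfold Claim_exact_desShiftSubKey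
  intro k dir s e hdom hpre hD
  obtain ⟨h0, h1, h2, h3⟩ := hpre
  obtain ⟨hes, hne⟩ := hD
  rw [pv_B_empty k dir s e hes]
  have hz : (e - s).toNat = 0 := by omega
  by_cases hd : dir > 0
  · rw [pv_A_pos k dir s e hd h0 h1 h2 h3, hz]
    exact pv_W_ne k s _ h0 h1 (pv_probe_mem k e) hne
  · rw [pv_A_neg k dir s e hd h0 h1 h2 h3, hz]
    exact pv_W_ne k e _ h2 h3 (pv_probe_mem k s) (Ne.symm hne)
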